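-- pv_equiv track=rewrite | github.com/phentraa/advent-of-code | 2025/day-9/part-2-solution.py | get_allowed_intervals
-- ===== SOURCE A (Python) =====
-- def get_allowed_intervals(corners):
--     """
--     Returns a dict mapping row y -> list of x-intervals (start_x, end_x) that are allowed.
--     """
--     row_intervals = {}
--
--     # Step 1: add green edges connecting consecutive red tiles
--     for i in range(len(corners)):
--         ca = corners[i]
--         cb = corners[(i + 1) % len(corners)]  # wrap around
--
--         if ca[1] == cb[1]:  # horizontal edge
--             y = ca[1]
--             x_start, x_end = sorted((ca[0], cb[0]))
--             row_intervals.setdefault(y, []).append((x_start, x_end))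
--         else:  # vertical edge
--             x = ca[0]
--             y_start, y_end = sorted((ca[1], cb[1]))
--             for y in range(y_start, y_end + 1):
--                 row_intervals.setdefault(y, []).append((x, x))
--
--     # Step 2: fill interior of the loop using row scanlines
--     min_y = min(c[1] for c in corners)
--     max_y = max(c[1] for c in corners)
--
--     for y in range(min_y, max_y + 1):
--         if y not in row_intervals:
--             continue
--         # merge intervals on this row
--         intervals = sorted(row_intervals[y])
--         merged = []
--         for start, end in intervals:
--             if not merged or start > merged[-1][1] + 1:
--                 merged.append([start, end])
--             else:
--                 merged[-1][1] = max(merged[-1][1], end)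
--         # fill gaps between leftmost and rightmost interval (interior)
--         left, right = merged[0][0], merged[-1][1]
--         row_intervals[y] = [(left, right)]
--
--     return row_intervals
-- ===== SOURCE B (Python) =====
-- def get_allowed_intervals(corners):
--     """
--     Same result as A: dict y -> [(left, right)] spanning the row. Instead of
--     collecting every covered cell and sort+merging per row, keep one running
--     (min, max) pair per row, updated in a single pass over the edges.
--     """
--     bounds = {}
--     for (xa, ya), (xb, yb) in zip(corners, corners[1:] + corners[:1]):
--         if ya == yb:
--             lo, hi, ys = min(xa, xb), max(xa, xb), (ya,)
--         else:
--             lo = hi = xa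
--             ys = range(min(ya, yb), max(ya, yb) + 1)
--         for y in ys:
--             if y in bounds:
--                 l, h = bounds[y]
--                 bounds[y] = (min(l, lo), max(h, hi))
--             else:
--                 bounds[y] = (lo, hi)
--     return {y: [b] for y, b in bounds.items()}
-- ===== Notes on version B (the rewrite author's own statement) =====
-- stated objective: faster
-- what changed: B keeps one running (min,max) pair per row updated in a single pass over the edges, instead of A's appending every covered interval per row and then sorting and merging each row's list in a second pass; B also iterates edges by zipping the list with its rotation instead of indexing with (i+1) % n.
import Mathlib
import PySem

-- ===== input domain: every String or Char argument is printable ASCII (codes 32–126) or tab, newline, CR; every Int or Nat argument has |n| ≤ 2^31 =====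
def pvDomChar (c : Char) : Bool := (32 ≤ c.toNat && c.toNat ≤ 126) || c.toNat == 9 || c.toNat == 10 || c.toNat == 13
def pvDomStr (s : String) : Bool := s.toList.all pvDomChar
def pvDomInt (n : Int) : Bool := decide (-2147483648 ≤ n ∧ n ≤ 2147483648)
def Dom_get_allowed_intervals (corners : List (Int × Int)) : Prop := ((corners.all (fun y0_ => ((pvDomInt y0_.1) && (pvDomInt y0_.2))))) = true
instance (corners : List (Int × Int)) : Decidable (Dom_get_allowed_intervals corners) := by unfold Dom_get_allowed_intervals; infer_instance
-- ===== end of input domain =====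

-- B replaces A's per-row collect/sort/merge by one running (min,max) pair per row,
-- updated in a single pass over the edges (objective: faster, no per-row sort).

-- ===== PORT A =====

-- one step of A's interval-merging loop ('for start, end in intervals: …')
def mergeStep (m : List (Int × Int)) (se : Int × Int) : List (Int × Int) :=
  match m.getLast? with
  | none => m ++ [se]                                   -- 'if not merged'
  | some last =>
      if last.2 + 1 < se.1 then m ++ [se]               -- 'start > merged[-1][1] + 1'
      else m.dropLast ++ [(last.1, max last.2 se.2)]    -- 'merged[-1][1] = max(…)'

-- body of the inner 'for y in range(y_start, y_end + 1)' loop of step 1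
def vertBodyA (x : Int) (d : PySem.Dict Int (List (Int × Int))) (y : Int) :
    PySem.Dict Int (List (Int × Int)) :=
  d.modify y [] (fun l => l ++ [(x, x)])                -- setdefault(y, []).append((x, x))

-- body of step 1's edge loop, for one edge e = (ca, cb)
def edgeBodyA (d : PySem.Dict Int (List (Int × Int))) (e : (Int × Int) × (Int × Int)) :
    PySem.Dict Int (List (Int × Int)) :=
  if e.1.2 == e.2.2 then
    -- 'x_start, x_end = sorted((ca[0], cb[0]))'
    let p := if e.1.1 ≤ e.2.1 then (e.1.1, e.2.1) else (e.2.1, e.1.1)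
    d.modify e.1.2 [] (fun l => l ++ [p])               -- setdefault(y, []).append(p)
  else
    let ylo := if e.1.2 ≤ e.2.2 then e.1.2 else e.2.2   -- 'sorted((ca[1], cb[1]))'
    let yhi := if e.1.2 ≤ e.2.2 then e.2.2 else e.1.2
    (PySem.List.pyRange ylo (yhi + 1) 1).foldl (vertBodyA e.1.1) d

-- body of step 2's row loop
def rowBodyA (d : PySem.Dict Int (List (Int × Int))) (y : Int) :
    PySem.Dict Int (List (Int × Int)) :=
  if d.contains y then
    let intervals := PySem.List.sorted2 (d.getD y []) Prod.fst Prod.snd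
    let merged := intervals.foldl mergeStep []
    match merged with
    | [] => d  -- unreachable for any input: stored row lists are never empty
    | m0 :: _ => d.insert y [(m0.1, (merged.getLastD (0, 0)).2)]
  else d

def get_allowed_intervals (corners : List (Int × Int)) : List (Int × List (Int × Int)) :=
  let n : Int := corners.length
  -- Step 1: 'for i in range(len(corners)): ca = corners[i]; cb = corners[(i+1) % len(corners)]'
  let d := (PySem.List.pyRange 0 n 1).foldl (fun d i =>
    edgeBodyA d (PySem.List.pyGetD corners i (0, 0),
                 PySem.List.pyGetD corners (PySem.Int.mod (i + 1) n) (0, 0)))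
    PySem.Dict.empty
  -- Step 2: 'min_y = min(…); max_y = max(…); for y in range(min_y, max_y + 1): …'
  match PySem.List.min? (corners.map (·.2)) (fun v => v),
        PySem.List.max? (corners.map (·.2)) (fun v => v) with
  | some miny, some maxy =>
      ((PySem.List.pyRange miny (maxy + 1) 1).foldl rowBodyA d).items
  | _, _ => []  -- corners = []: Python raises ValueError at min(); excluded by Pre_

-- ===== PORT B =====

-- 'if y in bounds: bounds[y] = (min(l, lo), max(h, hi)) else: bounds[y] = (lo, hi)'
def altUpdate (b : PySem.Dict Int (Int × Int)) (y lo hi : Int) : PySem.Dict Int (Int × Int) :=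
  match b.get? y with
  | some lh => b.insert y (min lh.1 lo, max lh.2 hi)
  | none => b.insert y (lo, hi)

-- body of B's single edge loop, for one edge e = ((xa, ya), (xb, yb))
def edgeBodyB (b : PySem.Dict Int (Int × Int)) (e : (Int × Int) × (Int × Int)) :
    PySem.Dict Int (Int × Int) :=
  if e.1.2 == e.2.2 then altUpdate b e.1.2 (min e.1.1 e.2.1) (max e.1.1 e.2.1)
  else (PySem.List.pyRange (min e.1.2 e.2.2) (max e.1.2 e.2.2 + 1) 1).foldl
    (fun b y => altUpdate b y e.1.1 e.1.1) b

def get_allowed_intervals_alt (corners : List (Int × Int)) : List (Int × List (Int × Int)) :=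
  -- 'for (xa, ya), (xb, yb) in zip(corners, corners[1:] + corners[:1]): …'
  let b := (corners.zip (corners.drop 1 ++ corners.take 1)).foldl edgeBodyB PySem.Dict.empty
  -- 'return {y: [b] for y, b in bounds.items()}'
  b.items.map (fun kv => (kv.1, [kv.2]))

-- ===== PRECONDITION & SPEC =====
-- Pre_ excludes only the empty list, on which Python A raises ValueError (min() of an empty sequence).
def Pre_get_allowed_intervals (corners : List (Int × Int)) : Prop := corners ≠ []
instance (corners : List (Int × Int)) : Decidable (Pre_get_allowed_intervals corners) := by unfold Pre_get_allowed_intervals; infer_instance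
def pvWitness_get_allowed_intervals : (List (Int × Int)) := ([(0, 0), (2, 0), (2, 2), (0, 2)])

def Spec_get_allowed_intervals (corners : List (Int × Int)) (out : List (Int × List (Int × Int))) : Prop := out = get_allowed_intervals_alt corners
instance (corners : List (Int × Int)) (out : List (Int × List (Int × Int))) : Decidable (Spec_get_allowed_intervals corners out) := by unfold Spec_get_allowed_intervals; infer_instance

-- ===== CLAIM (what is proved, stated in full; the proofs are below) =====
def Claim_equal_get_allowed_intervals : Prop := ∀ (corners : List (Int × Int)), Dom_get_allowed_intervals corners → Pre_get_allowed_intervals corners → Spec_get_allowed_intervals corners (get_allowed_intervals corners)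

-- ===== LEMMAS AND PROOFS =====

-- the (min fst, max snd) span of a nonempty row list; (0,0) is a junk value for []
def spanF : List (Int × Int) → Int × Int
  | [] => (0, 0)
  | p :: t => ((t.map Prod.fst).foldl min p.1, (t.map Prod.snd).foldl max p.2)

-- what A's step 2 does to one row's list
def rowOut (l : List (Int × Int)) : List (Int × Int) :=
  let merged := (PySem.List.sorted2 l Prod.fst Prod.snd).foldl mergeStep []
  match merged with
  | [] => l
  | m0 :: _ => [(m0.1, (merged.getLastD (0, 0)).2)]

-- relation maintained between A's dict of lists and B's dict of (min,max) pairs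
def RelAB (d : PySem.Dict Int (List (Int × Int))) (b : PySem.Dict Int (Int × Int)) : Prop :=
  b.items = d.items.map (fun kv => (kv.1, spanF kv.2))

-- shape invariant on A's dict
def GoodA (miny maxy : Int) (d : PySem.Dict Int (List (Int × Int))) : Prop :=
  d.keys.Nodup ∧ ∀ kv ∈ d.items, kv.2 ≠ [] ∧ (∀ p ∈ kv.2, p.1 ≤ p.2) ∧ miny ≤ kv.1 ∧ kv.1 ≤ maxy

theorem foldl_min_le_init (a : Int) (t : List Int) : t.foldl min a ≤ a := by
  induction t generalizing a with
  | nil => simp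
  | cons y ys ih => exact le_trans (ih _) (min_le_left _ _)

theorem foldl_min_le (a : Int) (t : List Int) : ∀ x ∈ t, t.foldl min a ≤ x := by
  induction t generalizing a with
  | nil => simp
  | cons y ys ih =>
    intro x hx
    rcases List.mem_cons.mp hx with h | h
    · show List.foldl min (min a y) ys ≤ x
      subst h
      exact le_trans (foldl_min_le_init _ _) (min_le_right _ _)
    · exact ih _ x h

theorem foldl_min_mem (a : Int) (t : List Int) : t.foldl min a = a ∨ t.foldl min a ∈ t := by
  induction t generalizing a with
  | nil => simp
  | cons y ys ih =>
    have he : List.foldl min a (y :: ys) = List.foldl min (min a y) ys := rfl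
    rw [he]
    rcases ih (min a y) with h | h
    · rcases min_cases a y with ⟨hm, _⟩ | ⟨hm, _⟩
      · left; rw [h, hm]
      · right; rw [h, hm]; exact List.mem_cons_self ..
    · right; exact List.mem_cons_of_mem _ h

theorem foldl_max_ge_init (a : Int) (t : List Int) : a ≤ t.foldl max a := by
  induction t generalizing a with
  | nil => simp
  | cons y ys ih => exact le_trans (le_max_left _ _) (ih _)

theorem foldl_max_ge (a : Int) (t : List Int) : ∀ x ∈ t, x ≤ t.foldl max a := by
  induction t generalizing a with
  | nil => simp
  | cons y ys ih =>
    intro x hx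
    rcases List.mem_cons.mp hx with h | h
    · show x ≤ List.foldl max (max a y) ys
      subst h
      exact le_trans (le_max_right _ _) (foldl_max_ge_init _ _)
    · exact ih _ x h

theorem foldl_max_mem (a : Int) (t : List Int) : t.foldl max a = a ∨ t.foldl max a ∈ t := by
  induction t generalizing a with
  | nil => simp
  | cons y ys ih =>
    have he : List.foldl max a (y :: ys) = List.foldl max (max a y) ys := rfl
    rw [he]
    rcases ih (max a y) with h | h
    · rcases max_cases a y with ⟨hm, _⟩ | ⟨hm, _⟩
      · left; rw [h, hm]
      · right; rw [h, hm]; exact List.mem_cons_self ..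
    · right; exact List.mem_cons_of_mem _ h

theorem spanF_append (l : List (Int × Int)) (hl : l ≠ []) (lo hi : Int) :
    spanF (l ++ [(lo, hi)]) = (min (spanF l).1 lo, max (spanF l).2 hi) := by
  match l with
  | p :: t =>
    show spanF (p :: (t ++ [(lo, hi)])) = _
    simp [spanF, List.foldl_append]

-- spanF of a nonempty list is (min of fsts, max of snds), characterized by mem/le
theorem spanF_le_fst (l : List (Int × Int)) (hl : l ≠ []) : ∀ p ∈ l, (spanF l).1 ≤ p.1 := by
  match l with
  | p :: t =>
    intro q hq
    rcases List.mem_cons.mp hq with h | h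
    · subst h; exact foldl_min_le_init _ _
    · exact foldl_min_le _ _ _ (List.mem_map_of_mem h)
theorem spanF_fst_mem (l : List (Int × Int)) (hl : l ≠ []) : ∃ p ∈ l, (spanF l).1 = p.1 := by
  match l with
  | p :: t =>
    rcases foldl_min_mem p.1 (t.map Prod.fst) with h | h
    · exact ⟨p, List.mem_cons_self .., h⟩
    · rcases List.mem_map.mp h with ⟨q, hq, he⟩
      exact ⟨q, List.mem_cons_of_mem _ hq, he.symm⟩
theorem spanF_ge_snd (l : List (Int × Int)) (hl : l ≠ []) : ∀ p ∈ l, p.2 ≤ (spanF l).2 := by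
  match l with
  | p :: t =>
    intro q hq
    rcases List.mem_cons.mp hq with h | h
    · subst h; exact foldl_max_ge_init _ _
    · exact foldl_max_ge _ _ _ (List.mem_map_of_mem h)
theorem spanF_snd_mem (l : List (Int × Int)) (hl : l ≠ []) : ∃ p ∈ l, (spanF l).2 = p.2 := by
  match l with
  | p :: t =>
    rcases foldl_max_mem p.2 (t.map Prod.snd) with h | h
    · exact ⟨p, List.mem_cons_self .., h⟩
    · rcases List.mem_map.mp h with ⟨q, hq, he⟩
      exact ⟨q, List.mem_cons_of_mem _ hq, he.symm⟩

-- lexicographic-≤ on Int pairs (Python tuple order)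
def LexLe (a b : Int × Int) : Prop := a.1 < b.1 ∨ (a.1 = b.1 ∧ a.2 ≤ b.2)

theorem lexle_trans {a b c : Int × Int} (h1 : LexLe a b) (h2 : LexLe b c) : LexLe a c := by
  unfold LexLe at *; omega

theorem insertBy_pairwise_lexle (x : Int × Int) (acc : List (Int × Int))
    (h : acc.Pairwise LexLe) :
    (PySem.List.insertBy (fun a b => decide (a.1 < b.1) || !decide (b.1 < a.1) && decide (a.2 < b.2)) x acc).Pairwise LexLe := by
  induction acc with
  | nil => simp [PySem.List.insertBy]
  | cons y ys ih =>
    rw [List.pairwise_cons] at h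
    show (if (decide (x.1 < y.1) || !decide (y.1 < x.1) && decide (x.2 < y.2)) = true
          then x :: y :: ys
          else y :: PySem.List.insertBy _ x ys).Pairwise LexLe
    split
    · rename_i hb
      simp only [Bool.or_eq_true, Bool.and_eq_true, decide_eq_true_eq, Bool.not_eq_eq_eq_not, Bool.not_true] at hb
      have hxy : LexLe x y := by unfold LexLe; rcases hb with h1 | ⟨h1, h2⟩ <;> [left; skip] <;> first | exact h1 | (simp at h1; omega)
      rw [List.pairwise_cons]
      refine ⟨?_, List.Pairwise.cons h.1 h.2⟩
      intro z hz
      rcases List.mem_cons.mp hz with hz | hz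
      · subst hz; exact hxy
      · exact lexle_trans hxy (h.1 z hz)
    · rename_i hb
      simp only [Bool.or_eq_true, Bool.and_eq_true, decide_eq_true_eq, Bool.not_eq_eq_eq_not, Bool.not_true] at hb
      push_neg at hb
      have hyx : LexLe y x := by unfold LexLe; by_cases h1 : y.1 < x.1; · left; exact h1
                                 · have := hb.1; have := hb.2 (by simp; omega); omega
      rw [List.pairwise_cons]
      refine ⟨?_, ih h.2⟩
      intro z hz
      rcases (PySem.List.mem_insertBy _ _ _ _).mp hz with hz | hz
      · subst hz; exact hyx
      · exact h.1 z hz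



theorem foldl_insertBy_pairwise (l acc : List (Int × Int)) (h : acc.Pairwise LexLe) :
    (l.foldl (fun acc x => PySem.List.insertBy
      (fun a b => decide (a.1 < b.1) || !decide (b.1 < a.1) && decide (a.2 < b.2)) x acc) acc).Pairwise LexLe := by
  induction l generalizing acc with
  | nil => exact h
  | cons p t ih => exact ih _ (insertBy_pairwise_lexle p acc h)

theorem sorted2_pairwise_lexle (l : List (Int × Int)) :
    (PySem.List.sorted2 l Prod.fst Prod.snd).Pairwise LexLe :=
  foldl_insertBy_pairwise l [] (List.Pairwise.nil)

-- merge-loop invariants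
theorem mergeStep_ne_nil (m : List (Int × Int)) (se : Int × Int) : mergeStep m se ≠ [] := by
  unfold mergeStep
  match h : m.getLast? with
  | none => simp
  | some last => simp only; split <;> simp
theorem mergeStep_head (m : List (Int × Int)) (hm : m ≠ []) (se : Int × Int) (j : Int × Int) :
    ((mergeStep m se).headD j).1 = (m.headD j).1 := by
  unfold mergeStep
  match h : m.getLast? with
  | none => simp [List.getLast?_eq_none_iff.mp h] at hm
  | some last =>
    simp only
    split
    · match m, hm with
      | p :: t, _ => simp
    · match m, hm with
      | [p], _ =>
        simp at h
        simp [h]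
      | p :: q :: t, _ =>
        have : (p :: q :: t).dropLast = p :: (q :: t).dropLast := rfl
        simp [this]
theorem mergeStep_last (m : List (Int × Int)) (hm : m ≠ []) (se : Int × Int) (hse : se.1 ≤ se.2) (j : Int × Int) :
    ((mergeStep m se).getLastD j).2 = max ((m.getLastD j).2) se.2 := by
  unfold mergeStep
  match h : m.getLast? with
  | none => simp [List.getLast?_eq_none_iff.mp h] at hm
  | some last =>
    have hl : m.getLastD j = last := by
      rw [List.getLastD_eq_getLast?, h]; rfl
    simp only
    split
    · rename_i hgt
      rw [hl]
      simp only [List.getLastD_concat]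
      omega
    · rw [hl]
      simp

theorem merge_fold_inv (t : List (Int × Int)) (ht : ∀ p ∈ t, p.1 ≤ p.2) :
    ∀ (m : List (Int × Int)), m ≠ [] →
    (t.foldl mergeStep m) ≠ [] ∧
    (((t.foldl mergeStep m).headD (0,0)).1 = (m.headD (0,0)).1) ∧
    (((t.foldl mergeStep m).getLastD (0,0)).2 = (t.map Prod.snd).foldl max ((m.getLastD (0,0)).2)) := by
  induction t with
  | nil => intro m hm; exact ⟨hm, rfl, rfl⟩
  | cons se t ih =>
    intro m hm
    have hse : se.1 ≤ se.2 := ht se (List.mem_cons_self ..)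
    have ht' : ∀ p ∈ t, p.1 ≤ p.2 := fun p hp => ht p (List.mem_cons_of_mem _ hp)
    obtain ⟨a, b, c⟩ := ih ht' (mergeStep m se) (mergeStep_ne_nil m se)
    refine ⟨a, ?_, ?_⟩
    · rw [List.foldl_cons, b, mergeStep_head m hm se (0,0)]
    · rw [List.foldl_cons, c, mergeStep_last m hm se hse (0,0), List.map_cons, List.foldl_cons]

-- A's per-row sort+merge computes exactly the span
theorem rowOut_eq_spanF (l : List (Int × Int)) (hl : l ≠ []) (hle : ∀ p ∈ l, p.1 ≤ p.2) :
    rowOut l = [spanF l] := by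
  have hperm : (PySem.List.sorted2 l Prod.fst Prod.snd).Perm l :=
    PySem.List.sorted2_perm l Prod.fst Prod.snd false
  have hsne : PySem.List.sorted2 l Prod.fst Prod.snd ≠ [] := by
    intro h; exact hl ((h ▸ hperm).symm.eq_nil)
  match hs : PySem.List.sorted2 l Prod.fst Prod.snd with
  | [] => exact absurd hs hsne
  | s0 :: rest =>
    have hmem : ∀ p ∈ s0 :: rest, p ∈ l := fun p hp => (hs ▸ hperm).mem_iff.mp hp
    have hle' : ∀ p ∈ rest, p.1 ≤ p.2 := fun p hp => hle p (hmem p (List.mem_cons_of_mem _ hp))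
    have hms : mergeStep [] s0 = [s0] := rfl
    obtain ⟨hne, hhead, hlast⟩ := merge_fold_inv rest hle' [s0] (by simp)
    have hfold : (PySem.List.sorted2 l Prod.fst Prod.snd).foldl mergeStep []
        = rest.foldl mergeStep [s0] := by rw [hs, List.foldl_cons, hms]
    -- the two extremal values
    have hpw := sorted2_pairwise_lexle l
    rw [hs, List.pairwise_cons] at hpw
    have hfst : s0.1 = (spanF l).1 := by
      obtain ⟨p, hp, hpe⟩ := spanF_fst_mem l hl
      have hps : p ∈ s0 :: rest := (hs ▸ hperm).mem_iff.mpr hp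
      have h1 : (spanF l).1 ≤ s0.1 := spanF_le_fst l hl s0 (hmem s0 (List.mem_cons_self ..))
      have h2 : s0.1 ≤ (spanF l).1 := by
        rcases List.mem_cons.mp hps with h | h
        · rw [hpe, h]
        · have := hpw.1 p h; unfold LexLe at this; omega
      omega
    have hsnd : (rest.map Prod.snd).foldl max s0.2 = (spanF l).2 := by
      have h1 : (rest.map Prod.snd).foldl max s0.2 ≤ (spanF l).2 := by
        rcases foldl_max_mem s0.2 (rest.map Prod.snd) with h | h
        · rw [h]; exact spanF_ge_snd l hl s0 (hmem s0 (List.mem_cons_self ..))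
        · obtain ⟨q, hq, hqe⟩ := List.mem_map.mp h
          rw [← hqe]; exact spanF_ge_snd l hl q (hmem q (List.mem_cons_of_mem _ hq))
      have h2 : (spanF l).2 ≤ (rest.map Prod.snd).foldl max s0.2 := by
        obtain ⟨q, hq, hqe⟩ := spanF_snd_mem l hl
        have hqs : q ∈ s0 :: rest := (hs ▸ hperm).mem_iff.mpr hq
        rw [hqe]
        rcases List.mem_cons.mp hqs with h | h
        · rw [h]; exact foldl_max_ge_init _ _
        · exact foldl_max_ge _ _ _ (List.mem_map_of_mem h)
      omega
    -- assemble
    unfold rowOut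
    rw [hfold]
    match hm : rest.foldl mergeStep [s0] with
    | [] => exact absurd hm hne
    | m0 :: ms =>
      have hm0 : m0.1 = s0.1 := by
        have := hhead; rw [hm] at this; simpa using this
      have hlv : ((m0 :: ms).getLastD (0,0)).2 = (spanF l).2 := by
        rw [← hm, hlast]; simpa using hsnd
      rw [List.cons.injEq]
      constructor
      · rw [hm0, hfst, hlv]
      · rfl

-- one related update step
theorem keys_eq_of_rel (d : PySem.Dict Int (List (Int × Int))) (b : PySem.Dict Int (Int × Int))
    (hrel : RelAB d b) : b.keys = d.keys := by
  show b.items.map Prod.fst = d.items.map Prod.fst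
  rw [hrel, List.map_map]
  rfl

theorem contains_eq_of_rel (d : PySem.Dict Int (List (Int × Int))) (b : PySem.Dict Int (Int × Int))
    (hrel : RelAB d b) (y : Int) : b.contains y = d.contains y := by
  rw [PySem.Dict.contains_eq_decide_mem_keys, PySem.Dict.contains_eq_decide_mem_keys,
    keys_eq_of_rel d b hrel]

theorem rel_update (d : PySem.Dict Int (List (Int × Int))) (b : PySem.Dict Int (Int × Int))
    (hnd : d.keys.Nodup) (hne : ∀ kv ∈ d.items, kv.2 ≠ []) (hrel : RelAB d b) (y lo hi : Int) :
    RelAB (d.modify y [] (fun l => l ++ [(lo, hi)])) (altUpdate b y lo hi) := by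
  have hmod : d.modify y [] (fun l => l ++ [(lo, hi)]) = d.insert y (d.getD y [] ++ [(lo, hi)]) := rfl
  have hbnd : b.keys.Nodup := by rw [keys_eq_of_rel d b hrel]; exact hnd
  rw [hmod]
  by_cases hc : d.contains y = true
  · -- existing key
    obtain ⟨v, hv⟩ : ∃ v, (y, v) ∈ d.items := by
      have : y ∈ d.keys := (PySem.Dict.contains_iff_mem_keys d y).mp hc
      obtain ⟨kv, hkv, he⟩ := List.mem_map.mp this
      exact ⟨kv.2, by rwa [show (y, kv.2) = kv from by rw [← he]]⟩
    have hgd : d.getD y [] = v := PySem.Dict.getD_of_mem_items d hv hnd []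
    have hvne : v ≠ [] := (hne (y, v) hv)
    have hbv : (y, spanF v) ∈ b.items := by
      rw [hrel]; exact List.mem_map_of_mem hv
    have hbg : b.get? y = some (spanF v) := PySem.Dict.get?_of_mem_items b hbv hbnd
    show RelAB _ (altUpdate b y lo hi)
    unfold altUpdate
    rw [hbg]
    show (b.insert y (min (spanF v).1 lo, max (spanF v).2 hi)).items = _
    have hbc : b.contains y = true := by rw [contains_eq_of_rel d b hrel]; exact hc
    rw [PySem.Dict.items_insert, if_pos hbc, PySem.Dict.items_insert, if_pos hc, hrel,
      List.map_map, List.map_map]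
    apply List.map_congr_left
    intro kv hkv
    by_cases hky : kv.1 = y
    · simp only [Function.comp_apply, hky, BEq.rfl, if_pos]
      have : spanF (d.getD y [] ++ [(lo, hi)]) = (min (spanF v).1 lo, max (spanF v).2 hi) := by
        rw [hgd, spanF_append v hvne]
      simp [this]
    · simp [Function.comp_apply, hky]
  · -- fresh key
    have hgd : d.getD y [] = [] := PySem.Dict.getD_of_not_contains d [] (by simpa using hc)
    have hbc : b.contains y = false := by rw [contains_eq_of_rel d b hrel]; simpa using hc
    have hbg : b.get? y = none := by
      rw [PySem.Dict.get?_eq_none_iff_contains]; exact hbc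
    show RelAB _ (altUpdate b y lo hi)
    unfold altUpdate
    rw [hbg]
    show (b.insert y (lo, hi)).items = _
    rw [PySem.Dict.items_insert, if_neg (by simp [hbc]), PySem.Dict.items_insert,
      if_neg (by simp [hc]), hrel, List.map_append, hgd]
    rfl

theorem good_update (miny maxy : Int) (d : PySem.Dict Int (List (Int × Int)))
    (hg : GoodA miny maxy d) (y lo hi : Int) (hlh : lo ≤ hi) (hy1 : miny ≤ y) (hy2 : y ≤ maxy) :
    GoodA miny maxy (d.modify y [] (fun l => l ++ [(lo, hi)])) := by
  have hmod : d.modify y [] (fun l => l ++ [(lo, hi)]) = d.insert y (d.getD y [] ++ [(lo, hi)]) := rfl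
  obtain ⟨hnd, hitems⟩ := hg
  rw [hmod]
  refine ⟨PySem.Dict.nodup_keys_insert d _ _ hnd, ?_⟩
  intro kv hkv
  rcases (PySem.Dict.mem_items_insert d _ _ kv).mp hkv with h | ⟨h, _⟩
  · subst h
    refine ⟨by simp, ?_, hy1, hy2⟩
    intro p hp
    rcases List.mem_append.mp hp with h | h
    · by_cases hc : d.contains y = true
      · obtain ⟨v, hv⟩ : ∃ v, (y, v) ∈ d.items := by
          have : y ∈ d.keys := (PySem.Dict.contains_iff_mem_keys d y).mp hc
          obtain ⟨kv', hkv', he⟩ := List.mem_map.mp this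
          exact ⟨kv'.2, by rwa [show (y, kv'.2) = kv' from by rw [← he]]⟩
        rw [PySem.Dict.getD_of_mem_items d hv hnd []] at h
        exact (hitems (y, v) hv).2.1 p h
      · rw [PySem.Dict.getD_of_not_contains d [] (by simpa using hc)] at h
        simp at h
    · simp at h; subst h; exact hlh
  · exact hitems kv h

-- the vertical-edge inner loops stay related
theorem vert_fold (miny maxy x : Int) (ys : List Int) (hys : ∀ y ∈ ys, miny ≤ y ∧ y ≤ maxy) :
    ∀ (d : PySem.Dict Int (List (Int × Int))) (b : PySem.Dict Int (Int × Int)),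
    GoodA miny maxy d → RelAB d b →
    GoodA miny maxy (ys.foldl (fun d y => d.modify y [] (fun l => l ++ [(x, x)])) d) ∧
    RelAB (ys.foldl (fun d y => d.modify y [] (fun l => l ++ [(x, x)])) d)
        (ys.foldl (fun b y => altUpdate b y x x) b) := by
  induction ys with
  | nil => intro d b hg hrel; exact ⟨hg, hrel⟩
  | cons y t ih =>
    intro d b hg hrel
    have hy := hys y (List.mem_cons_self ..)
    have hg' := good_update miny maxy d hg y x x le_rfl hy.1 hy.2
    have hrel' := rel_update d b hg.1 (fun kv hkv => (hg.2 kv hkv).1) hrel y x x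
    exact ih (fun y hy => hys y (List.mem_cons_of_mem _ hy)) _ _ hg' hrel'

theorem edge_fold (miny maxy : Int) (es : List ((Int × Int) × (Int × Int)))
    (hes : ∀ e ∈ es, miny ≤ e.1.2 ∧ e.1.2 ≤ maxy ∧ miny ≤ e.2.2 ∧ e.2.2 ≤ maxy) :
    ∀ (d : PySem.Dict Int (List (Int × Int))) (b : PySem.Dict Int (Int × Int)),
    GoodA miny maxy d → RelAB d b →
    GoodA miny maxy (es.foldl edgeBodyA d) ∧
    RelAB (es.foldl edgeBodyA d) (es.foldl edgeBodyB b) := by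
  induction es with
  | nil => intro d b hg hrel; exact ⟨hg, hrel⟩
  | cons e t ih =>
    intro d b hg hrel
    have he := hes e (List.mem_cons_self ..)
    have ht := fun e' he' => hes e' (List.mem_cons_of_mem _ he')
    rw [List.foldl_cons, List.foldl_cons]
    unfold edgeBodyA edgeBodyB
    by_cases hy : e.1.2 = e.2.2
    · -- horizontal edge
      have hb : (e.1.2 == e.2.2) = true := by simp [hy]
      rw [hb]
      simp only [if_true]
      have hp : (if e.1.1 ≤ e.2.1 then (e.1.1, e.2.1) else (e.2.1, e.1.1))
          = (min e.1.1 e.2.1, max e.1.1 e.2.1) := by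
        split <;> rename_i h <;> simp [min_def, max_def, h]
      rw [hp]
      have hg' := good_update miny maxy d hg e.1.2 (min e.1.1 e.2.1) (max e.1.1 e.2.1)
        (by omega) he.1 he.2.1
      have hrel' := rel_update d b hg.1 (fun kv hkv => (hg.2 kv hkv).1) hrel e.1.2
        (min e.1.1 e.2.1) (max e.1.1 e.2.1)
      exact ih ht _ _ hg' hrel'
    · -- vertical edge
      have hb : (e.1.2 == e.2.2) = false := by simp [hy]
      rw [hb]
      simp only [Bool.false_eq_true, if_false]
      have hminmax : (if e.1.2 ≤ e.2.2 then e.1.2 else e.2.2) = min e.1.2 e.2.2 ∧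
          (if e.1.2 ≤ e.2.2 then e.2.2 else e.1.2) = max e.1.2 e.2.2 := by
        constructor <;> split <;> rename_i h <;> simp [min_def, max_def, h]
      rw [hminmax.1, hminmax.2]
      have hys : ∀ y ∈ PySem.List.pyRange (min e.1.2 e.2.2) (max e.1.2 e.2.2 + 1) 1,
          miny ≤ y ∧ y ≤ maxy := by
        intro y hyy
        have := PySem.List.mem_pyRange_one.mp hyy
        omega
      obtain ⟨hg', hrel'⟩ := vert_fold miny maxy e.1.1 _ hys d b hg hrel
      exact ih ht _ _ hg' hrel'

-- A's index loop enumerates exactly the rotated-zip pairs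
theorem range_zip (corners : List (Int × Int)) :
    (PySem.List.pyRange 0 (corners.length : Int) 1).map (fun i =>
      (PySem.List.pyGetD corners i ((0 : Int), (0 : Int)),
       PySem.List.pyGetD corners (PySem.Int.mod (i + 1) (corners.length : Int)) ((0 : Int), (0 : Int)))) =
    corners.zip (corners.drop 1 ++ corners.take 1) := by
  apply List.ext_getElem
  · rw [List.length_map, PySem.List.length_pyRange_one, List.length_zip, List.length_append,
      List.length_drop, List.length_take]
    omega
  · intro k h1 h2
    rw [List.length_map, PySem.List.length_pyRange_one] at h1
    have hk : k < corners.length := by omega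
    rw [List.getElem_map, PySem.List.getElem_pyRange_one, List.getElem_zip]
    have hz : (0 : Int) + k = (k : Int) := by omega
    rw [hz]
    have hget : PySem.List.pyGetD corners (k : Int) ((0 : Int), (0 : Int)) = corners[k] := by
      rw [PySem.List.pyGetD_eq_getElem corners _ (by omega) (by exact_mod_cast hk)]
      simp
    rw [hget]
    refine congrArg _ ?_
    by_cases hlast : k + 1 < corners.length
    · have hmod : PySem.Int.mod ((k : Int) + 1) (corners.length : Int) = ((k + 1 : Nat) : Int) := by
        show Int.fmod _ _ = _
        rw [Int.fmod_eq_emod, if_pos (Or.inl (by positivity)), add_zero]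
        rw [Int.emod_eq_of_lt (by omega) (by exact_mod_cast hlast)]
        push_cast; ring
      rw [hmod, PySem.List.pyGetD_eq_getElem corners _ (by omega) (by exact_mod_cast hlast)]
      rw [List.getElem_append_left (by simpa [List.length_drop] using (by omega : k < corners.length - 1))]
      simp
    · have hkl : k + 1 = corners.length := by omega
      have hmod : PySem.Int.mod ((k : Int) + 1) (corners.length : Int) = 0 := by
        show Int.fmod _ _ = _
        rw [Int.fmod_eq_emod, if_pos (Or.inl (by positivity)), add_zero]
        have : (k : Int) + 1 = (corners.length : Int) := by exact_mod_cast hkl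
        rw [this, Int.emod_self]
      rw [hmod, PySem.List.pyGetD_eq_getElem corners (0,0)
        (by omega) (by exact_mod_cast (by omega : 0 < corners.length))]
      rw [List.getElem_append_right (by simp; omega)]
      simp [List.getElem_take]
      congr 1
      omega

-- one pass of A's step-2 body rewrites exactly the y-entry through rowOut
theorem step2_body (d : PySem.Dict Int (List (Int × Int))) (hnd : d.keys.Nodup) (y : Int) :
    (rowBodyA d y).items
    = d.items.map (fun kv => if kv.1 = y then (kv.1, rowOut kv.2) else kv) := by
  unfold rowBodyA
  by_cases hc : d.contains y = true
  · rw [if_pos hc]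
    have hkey : ∀ kv ∈ d.items, kv.1 = y → kv.2 = d.getD y [] := by
      intro kv hkv he
      have : (y, kv.2) ∈ d.items := by rw [← he]; exact hkv
      rw [PySem.Dict.getD_of_mem_items d this hnd []]
    simp only
    match hm : (PySem.List.sorted2 (d.getD y []) Prod.fst Prod.snd).foldl mergeStep [] with
    | [] =>
      -- rowOut (getD y []) = getD y [], so the map is the identity on the y-entry
      conv_lhs => rw [show d.items = d.items.map id from (List.map_id _).symm]
      apply List.map_congr_left
      intro kv hkv
      by_cases he : kv.1 = y
      · rw [if_pos he, id_eq]
        have h2 : rowOut kv.2 = kv.2 := by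
          unfold rowOut
          rw [hkey kv hkv he, hm]
        rw [h2]
      · rw [if_neg he, id_eq]
    | m0 :: ms =>
      rw [PySem.Dict.items_insert_of_contains d _ hc]
      apply List.map_congr_left
      intro kv hkv
      by_cases he : kv.1 = y
      · rw [if_pos (by simp [he]), if_pos he]
        have h2 : rowOut kv.2 = [(m0.1, ((m0 :: ms).getLastD (0, 0)).2)] := by
          unfold rowOut
          rw [hkey kv hkv he, hm]
        rw [h2, he]
      · rw [if_neg (by simp [he]), if_neg he]
  · rw [if_neg hc]
    have hkey : ∀ kv ∈ d.items, kv.1 ≠ y := by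
      intro kv hkv he
      apply hc
      rw [PySem.Dict.contains_iff_mem_keys]
      rw [← he]
      exact List.mem_map_of_mem hkv
    conv_lhs => rw [show d.items = d.items.map id from (List.map_id _).symm]
    apply List.map_congr_left
    intro kv hkv
    rw [if_neg (hkey kv hkv), id_eq]

theorem step2_keys (d : PySem.Dict Int (List (Int × Int))) (hnd : d.keys.Nodup) (y : Int) :
    (rowBodyA d y).keys = d.keys := by
  simp only [PySem.Dict.keys]
  rw [step2_body d hnd y, List.map_map]
  apply List.map_congr_left
  intro kv _
  by_cases he : kv.1 = y <;> simp [he]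

-- step 2 rewrites every present row value through rowOut
theorem step2_fold (ys : List Int) (hnd : ys.Nodup) :
    ∀ (d : PySem.Dict Int (List (Int × Int))), d.keys.Nodup →
    (ys.foldl rowBodyA d).items =
    d.items.map (fun kv => if kv.1 ∈ ys then (kv.1, rowOut kv.2) else kv) := by
  induction ys with
  | nil => intro d _; simp
  | cons y t ih =>
    intro d hdn
    rw [List.foldl_cons]
    have hkeys : (rowBodyA d y).keys = d.keys := step2_keys d hdn y
    rw [ih (List.nodup_cons.mp hnd).2 _ (by rw [hkeys]; exact hdn)]
    rw [step2_body d hdn y, List.map_map]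
    apply List.map_congr_left
    intro kv hkv
    have hyt : y ∉ t := (List.nodup_cons.mp hnd).1
    by_cases he : kv.1 = y
    · simp only [Function.comp_apply, if_pos he]
      rw [if_neg (by simpa [he] using hyt), if_pos (by simp [he])]
    · simp only [Function.comp_apply, if_neg he]
      by_cases ht : kv.1 ∈ t
      · rw [if_pos ht, if_pos (by simp [ht])]
      · rw [if_neg ht, if_neg (by simp [he, ht])]

theorem main_eq (corners : List (Int × Int)) (hpre : corners ≠ []) :
    get_allowed_intervals corners = get_allowed_intervals_alt corners := by
  -- min and max of the corner rows exist
  obtain ⟨miny, hmin⟩ : ∃ m, PySem.List.min? (corners.map (·.2)) (fun v => v) = some m := by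
    cases h : PySem.List.min? (corners.map (·.2)) (fun v => v) with
    | none =>
      rw [PySem.List.min?_eq_none_iff] at h
      exact absurd (List.map_eq_nil_iff.mp h) hpre
    | some m => exact ⟨m, rfl⟩
  obtain ⟨maxy, hmax⟩ : ∃ m, PySem.List.max? (corners.map (·.2)) (fun v => v) = some m := by
    cases h : PySem.List.max? (corners.map (·.2)) (fun v => v) with
    | none =>
      rw [PySem.List.max?_eq_none_iff] at h
      exact absurd (List.map_eq_nil_iff.mp h) hpre
    | some m => exact ⟨m, rfl⟩
  have hbmin : ∀ y ∈ corners.map (·.2), miny ≤ y := PySem.List.min?_isMin hmin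
  have hbmax : ∀ y ∈ corners.map (·.2), y ≤ maxy := PySem.List.max?_isMax hmax
  -- step 1 of A is the rotated-zip edge fold
  have hD1 : (PySem.List.pyRange 0 (corners.length : Int) 1).foldl (fun d i =>
      edgeBodyA d (PySem.List.pyGetD corners i (0, 0),
        PySem.List.pyGetD corners (PySem.Int.mod (i + 1) (corners.length : Int)) (0, 0)))
      PySem.Dict.empty =
      (corners.zip (corners.drop 1 ++ corners.take 1)).foldl edgeBodyA PySem.Dict.empty := by
    rw [← range_zip corners, List.foldl_map]
  -- edge endpoints lie between miny and maxy
  have hes : ∀ e ∈ corners.zip (corners.drop 1 ++ corners.take 1),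
      miny ≤ e.1.2 ∧ e.1.2 ≤ maxy ∧ miny ≤ e.2.2 ∧ e.2.2 ≤ maxy := by
    intro e he
    have h1 : e.1 ∈ corners := List.of_mem_zip he |>.1
    have h2 : e.2 ∈ corners := by
      have h2' : e.2 ∈ corners.drop 1 ++ corners.take 1 := List.of_mem_zip he |>.2
      rcases List.mem_append.mp h2' with h | h
      · exact List.mem_of_mem_drop h
      · exact List.mem_of_mem_take h
    exact ⟨hbmin _ (List.mem_map_of_mem h1), hbmax _ (List.mem_map_of_mem h1),
      hbmin _ (List.mem_map_of_mem h2), hbmax _ (List.mem_map_of_mem h2)⟩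
  -- after step 1 the two dicts are related and A's dict is well-shaped
  obtain ⟨hg, hrel⟩ := edge_fold miny maxy (corners.zip (corners.drop 1 ++ corners.take 1)) hes
    PySem.Dict.empty PySem.Dict.empty ⟨PySem.Dict.nodup_keys_empty, by intro kv hkv; cases hkv⟩ rfl
  set D1 := (corners.zip (corners.drop 1 ++ corners.take 1)).foldl edgeBodyA PySem.Dict.empty
    with hD1def
  set B1 := (corners.zip (corners.drop 1 ++ corners.take 1)).foldl edgeBodyB PySem.Dict.empty
    with hB1def
  -- reduce both sides
  show (match PySem.List.min? (corners.map (·.2)) (fun v => v),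
             PySem.List.max? (corners.map (·.2)) (fun v => v) with
    | some miny, some maxy =>
        ((PySem.List.pyRange miny (maxy + 1) 1).foldl rowBodyA
          ((PySem.List.pyRange 0 (corners.length : Int) 1).foldl (fun d i =>
            edgeBodyA d (PySem.List.pyGetD corners i (0, 0),
              PySem.List.pyGetD corners (PySem.Int.mod (i + 1) (corners.length : Int)) (0, 0)))
            PySem.Dict.empty)).items
    | _, _ => ([] : List (Int × List (Int × Int)))) =
    B1.items.map (fun kv => (kv.1, [kv.2]))
  rw [hmin, hmax]
  simp only [hD1, ← hD1def]
  -- apply the step-2 characterization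
  rw [step2_fold (PySem.List.pyRange miny (maxy + 1) 1) (PySem.List.nodup_pyRange_one _ _)
    D1 hg.1, hrel, List.map_map]
  apply List.map_congr_left
  intro kv hkv
  have hk := hg.2 kv hkv
  have hkin : kv.1 ∈ PySem.List.pyRange miny (maxy + 1) 1 :=
    PySem.List.mem_pyRange_one.mpr ⟨hk.2.2.1, by omega⟩
  rw [if_pos hkin, rowOut_eq_spanF kv.2 hk.1 hk.2.1]
  rfl

-- ===== VERDICT (by name: the statement is the Claim_ definition above) =====
theorem get_allowed_intervals_spec : Claim_equal_get_allowed_intervals := by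
  intro corners _ hpre
  exact main_eq corners hpre
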